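-- pv_equiv track=rewrite | github.com/hyunjun/practice | python/problem-remove-element/move_targets.py | move_targets
-- ===== SOURCE A (Python) =====
-- def move_targets(nums, target):
--     if nums is None or 0 == len(nums):
--         return 0
--     i = 0
--     for j in range(len(nums)):
--         if target != nums[j]:
--             nums[i] = nums[j]
--             i += 1
--     for j in range(i, len(nums)):
--         nums[j] = target
--     return i
-- ===== SOURCE B (Python) =====
-- def move_targets(nums, target):
--     if nums is None or 0 == len(nums):
--         return 0
--     kept = [x for x in nums if x != target]
--     nums[:] = kept + [target] * (len(nums) - len(kept))
--     return len(kept)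
-- ===== Notes on version B (the rewrite author's own statement) =====
-- stated objective: simpler
-- what changed: Replaces the two-pointer in-place overwrite (write index i chasing read index j, then a second backfill loop) by a single filter pass building an auxiliary kept list and one bulk slice-assignment reconstruction.
import Mathlib
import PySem

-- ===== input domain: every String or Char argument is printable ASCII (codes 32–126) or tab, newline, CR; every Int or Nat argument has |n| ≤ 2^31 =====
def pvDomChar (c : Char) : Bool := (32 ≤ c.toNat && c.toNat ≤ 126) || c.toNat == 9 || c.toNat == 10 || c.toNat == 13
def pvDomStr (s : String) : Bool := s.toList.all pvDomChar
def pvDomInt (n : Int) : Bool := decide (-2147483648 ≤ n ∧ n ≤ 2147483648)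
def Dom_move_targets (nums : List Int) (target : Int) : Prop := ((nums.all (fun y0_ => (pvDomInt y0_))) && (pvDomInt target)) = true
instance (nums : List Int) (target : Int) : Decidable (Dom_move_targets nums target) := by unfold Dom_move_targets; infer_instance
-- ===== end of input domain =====

-- B replaces A's two-pointer in-place overwrite by a filter pass plus bulk reconstruction;
-- the equivalence proved here is about the RETURN value only (both Pythons mutate nums, to the same final contents).

-- ===== PORT A =====
-- the loop body of A's first for-loop: state is (current array, write index i)
def mtStepA (target : Int) (p : List Int × Int) (j : Int) : List Int × Int :=
  if target ≠ PySem.List.pyGetD p.1 j 0 then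
    (PySem.List.pySetD p.1 p.2 (PySem.List.pyGetD p.1 j 0), p.2 + 1)
  else p

def move_targets (nums : List Int) (target : Int) : Int :=
  if (0 : Int) = (nums.length : Int) then 0
  else
    let st := (PySem.List.pyRange 0 (nums.length : Int) 1).foldl (mtStepA target) (nums, 0)
    -- second loop: backfills target from i to the end (mutation only; return value is i)
    let _ := (PySem.List.pyRange st.2 (nums.length : Int) 1).foldl
      (fun a j => PySem.List.pySetD a j target) st.1
    st.2

-- ===== PORT B =====
def move_targets_alt (nums : List Int) (target : Int) : Int :=
  if (0 : Int) = (nums.length : Int) then 0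
  else
    let kept := nums.filter (fun x => x ≠ target)
    -- nums[:] = kept + [target] * (len(nums) - len(kept)): mutation only, result unused
    let _ := kept ++ List.replicate (nums.length - kept.length) target
    (kept.length : Int)

-- ===== PRECONDITION & SPEC =====
def Spec_move_targets (nums : List Int) (target : Int) (out : Int) : Prop := out = move_targets_alt nums target
instance (nums : List Int) (target : Int) (out : Int) : Decidable (Spec_move_targets nums target out) := by unfold Spec_move_targets; infer_instance

-- ===== CLAIM (what is proved, stated in full; the proofs are below) =====
def Claim_equal_move_targets : Prop := ∀ (nums : List Int) (target : Int), Dom_move_targets nums target → Spec_move_targets nums target (move_targets nums target)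

-- ===== LEMMAS AND PROOFS =====

-- invariant of A's first loop: having processed indices < k, the write index equals the
-- number of non-target elements among the first k entries of the ORIGINAL list, and the
-- array still agrees with the original list from position k on.
lemma mtLoopA_inv (nums : List Int) (target : Int) :
    ∀ (k : Nat) (arr : List Int), k ≤ nums.length → arr.length = nums.length →
      arr.drop k = nums.drop k →
      ((PySem.List.pyRange (k : Int) (nums.length : Int) 1).foldl (mtStepA target)
        (arr, ((nums.take k).countP (fun x => x ≠ target) : Int))).2
      = (nums.countP (fun x => x ≠ target) : Int) := by
  intro k
  induction' hwf : nums.length - k using Nat.strong_induction_on with m ih generalizing k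
  intro arr hk hlen hdrop
  rcases Nat.eq_or_lt_of_le hk with heq | hlt
  · -- k = length: range is empty, take k = whole list
    subst heq
    simp [List.take_of_length_le (le_refl _)]
  · have hcons : PySem.List.pyRange (k : Int) (nums.length : Int) 1
        = (k : Int) :: PySem.List.pyRange ((k : Int) + 1) (nums.length : Int) 1 :=
      PySem.List.pyRange_one_cons (by exact_mod_cast hlt)
    -- the read nums[k] through the partially-overwritten array equals the original value
    have hgetk : arr[k]'(by omega) = nums[k]'hlt := by
      have h0 : (arr.drop k)[0]'(by simp; omega) = (nums.drop k)[0]'(by simp; omega) := by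
        simp [hdrop]
      simpa [List.getElem_drop] using h0
    have hget : PySem.List.pyGetD arr (k : Int) 0 = nums[k]'hlt := by
      rw [PySem.List.pyGetD_natCast]
      simp [List.getD_eq_getElem?_getD, List.getElem?_eq_getElem (by omega : k < arr.length), hgetk]
    have hcount_le : (nums.take k).countP (fun x => x ≠ target) ≤ k := by
      calc (nums.take k).countP (fun x => x ≠ target) ≤ (nums.take k).length :=
            List.countP_le_length
        _ ≤ k := by simp
    have htake : nums.take (k + 1) = nums.take k ++ [nums[k]'hlt] := by
      rw [List.take_add_one, List.getElem?_eq_getElem hlt]; rfl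
    rw [hcons, List.foldl_cons]
    by_cases hne : target ≠ nums[k]'hlt
    · -- kept element: write arr[i] := nums[k], i += 1
      have hstep : mtStepA target (arr, ((nums.take k).countP (fun x => x ≠ target) : Int)) (k : Int)
          = (PySem.List.pySetD arr ((nums.take k).countP (fun x => x ≠ target) : Int) (nums[k]'hlt),
             ((nums.take k).countP (fun x => x ≠ target) : Int) + 1) := by
        simp [mtStepA, hget, hne]
      rw [hstep]
      have harr' : PySem.List.pySetD arr ((nums.take k).countP (fun x => x ≠ target) : Int) (nums[k]'hlt)
          = arr.set ((nums.take k).countP (fun x => x ≠ target)) (nums[k]'hlt) := by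
        exact_mod_cast PySem.List.pySetD_natCast (xs := arr)
          (n := (nums.take k).countP (fun x => x ≠ target)) (v := nums[k]'hlt)
      have hcount' : (nums.take (k + 1)).countP (fun x => x ≠ target)
          = (nums.take k).countP (fun x => x ≠ target) + 1 := by
        rw [htake, List.countP_append]
        simp [ne_comm.mp hne]
      have hdd : arr.drop (k + 1) = nums.drop (k + 1) := by
        have h1 := congrArg (List.drop 1) hdrop
        simpa [List.drop_drop] using h1
      have hdrop' : (arr.set ((nums.take k).countP (fun x => x ≠ target)) (nums[k]'hlt)).drop (k + 1)
          = nums.drop (k + 1) := by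
        rw [List.drop_set, if_pos (by omega), hdd]
      have := ih (nums.length - (k + 1)) (by omega) (k + 1) rfl
        (arr.set ((nums.take k).countP (fun x => x ≠ target)) (nums[k]'hlt))
        (by omega) (by simp [hlen]) hdrop'
      rw [harr']
      rw [hcount'] at this
      push_cast at this ⊢
      exact this
    · -- skipped element (nums[k] = target): state unchanged
      have hstep : mtStepA target (arr, ((nums.take k).countP (fun x => x ≠ target) : Int)) (k : Int)
          = (arr, ((nums.take k).countP (fun x => x ≠ target) : Int)) := by
        simp [mtStepA, hget, hne]
      rw [hstep]
      have hcount' : (nums.take (k + 1)).countP (fun x => x ≠ target)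
          = (nums.take k).countP (fun x => x ≠ target) := by
        push Not at hne
        rw [htake, List.countP_append]
        simp [hne.symm]
      have hdrop' : arr.drop (k + 1) = nums.drop (k + 1) := by
        have h1 := congrArg (List.drop 1) hdrop
        simpa [List.drop_drop] using h1
      have := ih (nums.length - (k + 1)) (by omega) (k + 1) rfl arr (by omega) hlen hdrop'
      rw [hcount'] at this
      push_cast at this ⊢
      exact this

-- ===== VERDICT (by name: the statement is the Claim_ definition above) =====
theorem move_targets_spec : Claim_equal_move_targets := by
  intro nums target _
  unfold Spec_move_targets move_targets move_targets_alt
  by_cases h0 : (0 : Int) = (nums.length : Int)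
  · simp [h0]
  · simp only [if_neg h0]
    have := mtLoopA_inv nums target 0 nums (Nat.zero_le _) rfl rfl
    simp only [List.take_zero, List.countP_nil, Nat.cast_zero] at this
    rw [this]
    simp [List.countP_eq_length_filter]
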